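-- pv_equiv track=rewrite | github.com/GOstrowski04/python | wizualizacjadanych/phonenumbers.py | c42
-- ===== SOURCE A (Python) =====
-- def c42(dni):
--     days = {"Poniedziałek": "Monday", "Wtorek": "Tuesday", "Środa": "Wednesday", "Czwartek": "Thursday",
--             "Piątek": "Friday", "Sobota": "Saturday", "Niedziela": "Sunday"}
--     listax = []
--     for i in days:
--         for j in dni:
--             if j == days[i]:
--                 listax.append(i)
--     return listax
-- ===== SOURCE B (Python) =====
-- def c42(dni):
--     eng_to_pol = {"Monday": "Poniedziałek", "Tuesday": "Wtorek", "Wednesday": "Środa",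
--                   "Thursday": "Czwartek", "Friday": "Piątek", "Saturday": "Sobota",
--                   "Sunday": "Niedziela"}
--     order = {"Monday": 0, "Tuesday": 1, "Wednesday": 2, "Thursday": 3,
--              "Friday": 4, "Saturday": 5, "Sunday": 6}
--     known = [d for d in dni if d in eng_to_pol]
--     known.sort(key=order.__getitem__)   # stable: keeps input order within each weekday
--     return [eng_to_pol[d] for d in known]
-- ===== Notes on version B (the rewrite author's own statement) =====
-- stated objective: alternative
-- what changed: B replaces A's seven per-day scans of dni by a filter to known English names, a stable sort by weekday index, and a single translation map; stability of the sort preserves A's within-day input order.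
import Mathlib
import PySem

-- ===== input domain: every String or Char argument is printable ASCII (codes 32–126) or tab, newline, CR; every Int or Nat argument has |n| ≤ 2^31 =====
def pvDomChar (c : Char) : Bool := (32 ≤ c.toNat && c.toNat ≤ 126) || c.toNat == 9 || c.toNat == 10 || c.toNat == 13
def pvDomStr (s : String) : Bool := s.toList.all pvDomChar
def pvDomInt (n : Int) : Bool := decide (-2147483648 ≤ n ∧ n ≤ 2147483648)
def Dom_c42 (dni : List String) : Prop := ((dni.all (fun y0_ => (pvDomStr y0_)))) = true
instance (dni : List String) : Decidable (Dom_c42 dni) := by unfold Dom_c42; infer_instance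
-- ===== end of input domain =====

-- B replaces A's seven scans of dni (one per dictionary key) by filter + stable sort by
-- weekday index + translate; same return value (B sorts a fresh local list, no caller-visible mutation).

-- ===== PORT A =====
def c42Days : PySem.Dict String String :=
  PySem.Dict.ofList [("Poniedziałek", "Monday"), ("Wtorek", "Tuesday"), ("Środa", "Wednesday"),
                     ("Czwartek", "Thursday"), ("Piątek", "Friday"), ("Sobota", "Saturday"),
                     ("Niedziela", "Sunday")]

def c42 (dni : List String) : List String :=
  -- 'for i in days: for j in dni: if j == days[i]: listax.append(i)'; iterate the items so days[i] is p.2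
  c42Days.items.foldl (fun listax p =>
    dni.foldl (fun acc j => if j == p.2 then acc ++ [p.1] else acc) listax) []

-- ===== PORT B =====
def c42E2P : PySem.Dict String String :=
  PySem.Dict.ofList [("Monday", "Poniedziałek"), ("Tuesday", "Wtorek"), ("Wednesday", "Środa"),
                     ("Thursday", "Czwartek"), ("Friday", "Piątek"), ("Saturday", "Sobota"),
                     ("Sunday", "Niedziela")]

def c42Order : PySem.Dict String Int :=
  PySem.Dict.ofList [("Monday", 0), ("Tuesday", 1), ("Wednesday", 2), ("Thursday", 3),
                     ("Friday", 4), ("Saturday", 5), ("Sunday", 6)]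

def c42_alt (dni : List String) : List String :=
  let known := dni.filter (fun d => (c42E2P.get? d).isSome)
  -- known.sort(key=order.__getitem__): every d in known is a key of order, so getD never takes its default
  let srt := PySem.List.sorted known (fun d => c42Order.getD d 0)
  srt.map (fun d => c42E2P.getD d "")

-- ===== PRECONDITION & SPEC =====
def Spec_c42 (dni : List String) (out : List String) : Prop := out = c42_alt dni
instance (dni : List String) (out : List String) : Decidable (Spec_c42 dni out) := by unfold Spec_c42; infer_instance

-- ===== CLAIM (what is proved, stated in full; the proofs are below) =====
def Claim_equal_c42 : Prop := ∀ (dni : List String), Dom_c42 dni → Spec_c42 dni (c42 dni)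

-- ===== LEMMAS AND PROOFS =====

-- insertBy walks past a prefix it does not insert into
theorem c42_insertBy_append_left {α : Type} (before : α → α → Bool) (x : α) (ys zs : List α)
    (h : ∀ y ∈ ys, before x y = false) :
    PySem.List.insertBy before x (ys ++ zs) = ys ++ PySem.List.insertBy before x zs := by
  induction ys with
  | nil => simp
  | cons y t ih =>
    simp only [List.cons_append, PySem.List.insertBy, h y (by simp)]
    simp only [Bool.false_eq_true, if_false, List.cons.injEq, true_and]
    exact ih (fun z hz => h z (by simp [hz]))

-- insertBy puts x in front of a block that is entirely after it
theorem c42_insertBy_front {α : Type} (before : α → α → Bool) (x : α) (ys : List α)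
    (h : ∀ y ∈ ys, before x y = true) :
    PySem.List.insertBy before x ys = x :: ys := by
  cases ys with
  | nil => rfl
  | cons y t => simp [PySem.List.insertBy, h y (by simp)]

-- a bucket for a key value x does not carry is untouched by appending x
theorem c42_bucket_ne {α : Type} (key : α → Int) (x : α) (l : List α) (k k0 : Nat)
    (hk : key x = (k0 : Int)) (hne : k ≠ k0) :
    (l ++ [x]).filter (fun y => key y == (k : Int)) = l.filter (fun y => key y == (k : Int)) := by
  rw [List.filter_append]
  have : (key x == (k : Int)) = false := by
    simp only [hk, beq_eq_false_iff_ne, ne_eq, Int.natCast_inj]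
    omega
  simp [List.filter, this]

-- inserting x into the bucket decomposition appends it to its own bucket
theorem c42_insert_bucket {α : Type} (key : α → Int) (x : α) (l : List α) (n k0 : Nat)
    (hk : key x = (k0 : Int)) (hn : k0 < n) :
    PySem.List.insertBy (fun a b => decide (key a < key b)) x
        ((List.range n).flatMap (fun k : Nat => l.filter (fun y => key y == (k : Int))))
      = (List.range n).flatMap (fun k : Nat => (l ++ [x]).filter (fun y => key y == (k : Int))) := by
  rw [show n = (k0 + 1) + (n - (k0 + 1)) from by omega, List.range_add,
      List.flatMap_append, List.flatMap_append, List.flatMap_map, List.flatMap_map]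
  rw [c42_insertBy_append_left]
  · rw [c42_insertBy_front]
    · -- suffix buckets (index > k0) are unchanged
      have hsuf : ((List.range (n - (k0 + 1))).flatMap
            (fun k : Nat => (l ++ [x]).filter (fun y => key y == ((k0 + 1 + k : Nat) : Int))))
          = (List.range (n - (k0 + 1))).flatMap
            (fun k : Nat => l.filter (fun y => key y == ((k0 + 1 + k : Nat) : Int))) := by
        simp only [List.flatMap_def]
        refine congrArg List.flatten (List.map_congr_left ?_)
        intro k _
        exact c42_bucket_ne key x l _ k0 hk (by omega)
      rw [hsuf, List.range_succ, List.flatMap_append, List.flatMap_append,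
          List.flatMap_singleton, List.flatMap_singleton]
      have hpre : ((List.range k0).flatMap (fun k : Nat => (l ++ [x]).filter (fun y => key y == (k : Int))))
          = (List.range k0).flatMap (fun k : Nat => l.filter (fun y => key y == (k : Int))) := by
        simp only [List.flatMap_def]
        refine congrArg List.flatten (List.map_congr_left ?_)
        intro k hkm
        exact c42_bucket_ne key x l k k0 hk (by simp at hkm; omega)
      rw [hpre, List.filter_append (p := fun y => key y == (k0 : Int))]
      have hx : [x].filter (fun y => key y == (k0 : Int)) = [x] := by simp [List.filter, hk]
      rw [hx]
      simp [List.append_assoc]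
    · -- everything in the suffix has key > k0
      intro y hy
      rw [List.mem_flatMap] at hy
      obtain ⟨k, _, hyk⟩ := hy
      have := (List.mem_filter.mp hyk).2
      have hkey : key y = ((k0 + 1 + k : Nat) : Int) := by simpa using this
      simp only [decide_eq_true_eq, hk, hkey]
      push_cast
      omega
  · -- everything in the prefix (buckets ≤ k0) has key ≤ k0
    intro y hy
    rw [List.mem_flatMap] at hy
    obtain ⟨k, hkm, hyk⟩ := hy
    have hkk : k < k0 + 1 := by simpa using List.mem_range.mp hkm
    have := (List.mem_filter.mp hyk).2
    have hkey : key y = (k : Int) := by simpa using this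
    simp only [decide_eq_false_iff_not, hk, hkey, not_lt]
    exact_mod_cast Nat.lt_succ_iff.mp hkk

-- stable sort by a small integer key is the concatenation of the buckets in key order
theorem c42_sorted_buckets {α : Type} (key : α → Int) (n : Nat) (xs : List α)
    (h : ∀ x ∈ xs, ∃ k : Nat, k < n ∧ key x = (k : Int)) :
    PySem.List.sorted xs key
      = (List.range n).flatMap (fun k : Nat => xs.filter (fun y => key y == (k : Int))) := by
  induction xs using List.reverseRecOn with
  | nil => simp [PySem.List.sorted_eq_foldl_insertBy]
  | append_singleton l x ih =>
    obtain ⟨k0, hk0n, hk0⟩ := h x (by simp)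
    rw [PySem.List.sorted_eq_foldl_insertBy, List.foldl_append, List.foldl_cons, List.foldl_nil,
        ← PySem.List.sorted_eq_foldl_insertBy, ih (fun y hy => h y (by simp [hy]))]
    exact c42_insert_bucket key x l n k0 hk0 hk0n

-- every string the membership filter keeps is one of the seven English day names
theorem c42_names (d : String) (h : (c42E2P.get? d).isSome = true) :
    d = "Monday" ∨ d = "Tuesday" ∨ d = "Wednesday" ∨ d = "Thursday" ∨ d = "Friday" ∨
    d = "Saturday" ∨ d = "Sunday" := by
  by_contra hc
  simp only [not_or] at hc
  obtain ⟨h1, h2, h3, h4, h5, h6, h7⟩ := hc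
  rw [show c42E2P = PySem.Dict.mk
        [("Monday", "Poniedziałek"), ("Tuesday", "Wtorek"), ("Wednesday", "Środa"),
         ("Thursday", "Czwartek"), ("Friday", "Piątek"), ("Saturday", "Sobota"),
         ("Sunday", "Niedziela")] from by decide] at h
  simp only [PySem.Dict.get?_mk_cons, beq_iff_eq] at h
  rw [if_neg (fun g => h1 g.symm), if_neg (fun g => h2 g.symm), if_neg (fun g => h3 g.symm),
      if_neg (fun g => h4 g.symm), if_neg (fun g => h5 g.symm), if_neg (fun g => h6 g.symm),
      if_neg (fun g => h7 g.symm)] at h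
  simp [PySem.Dict.get?] at h

-- the combined bucket-k ∧ known predicate is equality with the k-th English name
theorem c42_pt (d : String) (k : Nat) (hk : k < 7) :
    ((c42Order.getD d 0 == (k : Int)) && (c42E2P.get? d).isSome)
      = (d == ["Monday", "Tuesday", "Wednesday", "Thursday", "Friday", "Saturday", "Sunday"].getD k "") := by
  by_cases hs : (c42E2P.get? d).isSome = true
  · rcases c42_names d hs with h | h | h | h | h | h | h <;> subst h <;>
      interval_cases k <;> decide
  · rw [Bool.not_eq_true] at hs
    rw [hs, Bool.and_false]
    have hne : ∀ e : String, (c42E2P.get? e).isSome = true → d ≠ e := by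
      intro e he heq; rw [heq] at hs; rw [hs] at he; exact Bool.false_ne_true he
    interval_cases k <;>
      simp only [List.getD] <;>
      exact (beq_eq_false_iff_ne.mpr (hne _ (by decide))).symm

-- translating a bucket of one English name is the constant Polish name
theorem c42_bucket_map (dni : List String) (e p : String) (hep : c42E2P.getD e "" = p) :
    (dni.filter (· == e)).map (fun d => c42E2P.getD d "") = (dni.filter (· == e)).map (fun _ => p) := by
  refine List.map_congr_left ?_
  intro d hd
  have := (List.mem_filter.mp hd).2
  rw [show d = e from by simpa using this, hep]

-- A's inner scan produces the filter's image under the constant map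
theorem c42_group (dni : List String) (acc : List String) (p e : String) :
    dni.foldl (fun acc j => if j == e then acc ++ [p] else acc) acc
      = acc ++ (dni.filter (· == e)).map (fun _ => p) :=
  PySem.List.foldl_append_if (p := (· == e)) (f := fun _ => p) dni acc

theorem c42_items : c42Days.items =
    [("Poniedziałek", "Monday"), ("Wtorek", "Tuesday"), ("Środa", "Wednesday"),
     ("Czwartek", "Thursday"), ("Piątek", "Friday"), ("Sobota", "Saturday"),
     ("Niedziela", "Sunday")] := by decide

-- ===== VERDICT (by name: the statement is the Claim_ definition above) =====
theorem c42_spec : Claim_equal_c42 := by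
  intro dni _
  show c42 dni = c42_alt dni
  have hmem : ∀ d ∈ dni.filter (fun d => (c42E2P.get? d).isSome),
      ∃ k : Nat, k < 7 ∧ c42Order.getD d 0 = (k : Int) := by
    intro d hd
    rcases c42_names d (List.mem_filter.mp hd).2 with h | h | h | h | h | h | h <;> subst h
    · exact ⟨0, by omega, by decide⟩
    · exact ⟨1, by omega, by decide⟩
    · exact ⟨2, by omega, by decide⟩
    · exact ⟨3, by omega, by decide⟩
    · exact ⟨4, by omega, by decide⟩
    · exact ⟨5, by omega, by decide⟩
    · exact ⟨6, by omega, by decide⟩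
  have hb := c42_sorted_buckets (fun d => c42Order.getD d 0) 7
      (dni.filter (fun d => (c42E2P.get? d).isSome)) hmem
  have e0 : (fun a => ((c42Order.getD a 0 == (0 : Int)) && (c42E2P.get? a).isSome))
      = (fun a => a == "Monday") := funext fun d => c42_pt d 0 (by omega)
  have e1 : (fun a => ((c42Order.getD a 0 == (1 : Int)) && (c42E2P.get? a).isSome))
      = (fun a => a == "Tuesday") := funext fun d => c42_pt d 1 (by omega)
  have e2 : (fun a => ((c42Order.getD a 0 == (2 : Int)) && (c42E2P.get? a).isSome))
      = (fun a => a == "Wednesday") := funext fun d => c42_pt d 2 (by omega)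
  have e3 : (fun a => ((c42Order.getD a 0 == (3 : Int)) && (c42E2P.get? a).isSome))
      = (fun a => a == "Thursday") := funext fun d => c42_pt d 3 (by omega)
  have e4 : (fun a => ((c42Order.getD a 0 == (4 : Int)) && (c42E2P.get? a).isSome))
      = (fun a => a == "Friday") := funext fun d => c42_pt d 4 (by omega)
  have e5 : (fun a => ((c42Order.getD a 0 == (5 : Int)) && (c42E2P.get? a).isSome))
      = (fun a => a == "Saturday") := funext fun d => c42_pt d 5 (by omega)
  have e6 : (fun a => ((c42Order.getD a 0 == (6 : Int)) && (c42E2P.get? a).isSome))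
      = (fun a => a == "Sunday") := funext fun d => c42_pt d 6 (by omega)
  simp only [c42_alt]
  rw [hb]
  rw [show List.range 7 = [0, 1, 2, 3, 4, 5, 6] from rfl]
  simp only [List.flatMap_cons, List.flatMap_nil, List.append_nil, List.map_append,
    List.filter_filter, Nat.cast_ofNat, Nat.cast_zero, Nat.cast_one]
  rw [e0, e1, e2, e3, e4, e5, e6]
  rw [c42_bucket_map dni "Monday" "Poniedziałek" (by decide),
      c42_bucket_map dni "Tuesday" "Wtorek" (by decide),
      c42_bucket_map dni "Wednesday" "Środa" (by decide),
      c42_bucket_map dni "Thursday" "Czwartek" (by decide),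
      c42_bucket_map dni "Friday" "Piątek" (by decide),
      c42_bucket_map dni "Saturday" "Sobota" (by decide),
      c42_bucket_map dni "Sunday" "Niedziela" (by decide)]
  simp only [c42, c42_items, List.foldl_cons, List.foldl_nil, c42_group, List.nil_append,
    List.append_assoc]
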